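-- pv_equiv track=rewrite | github.com/KennethJHan/Bioinformatics_Biopython | Section2/089.py | mer
-- ===== SOURCE A (Python) =====
-- def mer(n, arr1, arr2):
--     if n == 1:
--         return arr2
--     else:
--         tmp = []
--         for i in arr1:
--             for j in arr2:
--                 tmp.append(i+j)
--         arr2 = tmp
--         n -= 1
--         return mer(n, arr1, arr2)
-- ===== SOURCE B (Python) =====
-- def mer(n, arr1, arr2):
--     res = arr2
--     for _ in range(n - 1):
--         res = [i + j for i in arr1 for j in res]
--     return res
-- ===== Notes on version B (the rewrite author's own statement) =====
-- stated objective: simpler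
-- what changed: Replaces tail recursion with rebuilt temporary lists by an iterative loop over range(n-1) with a single comprehension, in the same i-outer/j-inner order.
import Mathlib
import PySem

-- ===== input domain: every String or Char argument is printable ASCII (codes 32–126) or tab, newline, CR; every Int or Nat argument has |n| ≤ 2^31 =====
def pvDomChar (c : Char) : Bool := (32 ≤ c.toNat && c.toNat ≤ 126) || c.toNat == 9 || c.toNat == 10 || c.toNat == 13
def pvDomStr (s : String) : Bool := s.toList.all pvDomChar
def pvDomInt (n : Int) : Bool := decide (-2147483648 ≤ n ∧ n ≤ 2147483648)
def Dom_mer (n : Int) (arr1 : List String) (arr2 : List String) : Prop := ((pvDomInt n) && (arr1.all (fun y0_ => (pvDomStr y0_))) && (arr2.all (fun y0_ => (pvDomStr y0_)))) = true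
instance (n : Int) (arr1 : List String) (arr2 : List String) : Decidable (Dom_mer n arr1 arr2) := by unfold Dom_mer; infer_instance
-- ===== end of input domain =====

-- B replaces A's tail recursion (which rebuilds tmp and re-calls itself) by an iterative
-- loop over range(n-1) with a single product comprehension, same i-outer/j-inner order;
-- equivalence is claimed for n ≥ 1 (for n ≤ 0 Python A recurses until RecursionError).

-- ===== PORT A =====
def mer (n : Int) (arr1 : List String) (arr2 : List String) : List String :=
  if n == 1 then arr2
  else if _h : 1 < n then
    -- tmp = []; for i in arr1: for j in arr2: tmp.append(i+j)
    mer (n - 1) arr1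
      (arr1.foldl (fun tmp i => arr2.foldl (fun tmp j => tmp ++ [i ++ j]) tmp) [])
  else []  -- Python recurses forever here (n ≤ 0); outside Pre_mer, nothing claimed
termination_by n.toNat
decreasing_by omega

-- ===== PORT B =====
def mer_alt (n : Int) (arr1 : List String) (arr2 : List String) : List String :=
  (List.range (n - 1).toNat).foldl
    (fun res _ => arr1.flatMap (fun i => res.map (fun j => i ++ j))) arr2

-- ===== PRECONDITION & SPEC =====
-- Pre_ excludes n ≤ 0, on which Python A raises RecursionError (no value returned).
def Pre_mer (n : Int) (arr1 : List String) (arr2 : List String) : Prop := 1 ≤ n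
instance (n : Int) (arr1 : List String) (arr2 : List String) : Decidable (Pre_mer n arr1 arr2) := by unfold Pre_mer; infer_instance
def pvWitness_mer : Int × List String × List String := (2, ["a", "b"], ["x"])

def Spec_mer (n : Int) (arr1 : List String) (arr2 : List String) (out : List String) : Prop := out = mer_alt n arr1 arr2
instance (n : Int) (arr1 : List String) (arr2 : List String) (out : List String) : Decidable (Spec_mer n arr1 arr2 out) := by unfold Spec_mer; infer_instance

-- ===== CLAIM (what is proved, stated in full; the proofs are below) =====
def Claim_equal_mer : Prop := ∀ (n : Int) (arr1 : List String) (arr2 : List String), Dom_mer n arr1 arr2 → Pre_mer n arr1 arr2 → Spec_mer n arr1 arr2 (mer n arr1 arr2)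

-- ===== LEMMAS AND PROOFS =====

-- one cross-product step, as B computes it
def merStep (arr1 : List String) (res : List String) : List String :=
  arr1.flatMap (fun i => res.map (fun j => i ++ j))

theorem inner_foldl (i : String) (arr2 acc : List String) :
    arr2.foldl (fun tmp j => tmp ++ [i ++ j]) acc = acc ++ arr2.map (fun j => i ++ j) := by
  induction arr2 generalizing acc with
  | nil => simp
  | cons x xs ih => simp [List.foldl, ih]

theorem outer_foldl (arr1 arr2 acc : List String) :
    arr1.foldl (fun tmp i => arr2.foldl (fun tmp j => tmp ++ [i ++ j]) tmp) acc
      = acc ++ merStep arr1 arr2 := by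
  induction arr1 generalizing acc with
  | nil => simp [merStep]
  | cons x xs ih =>
      rw [List.foldl_cons, inner_foldl, ih]
      simp [merStep, List.append_assoc]

theorem foldl_range_const {α : Type} (f : α → α) (k : Nat) (init : α) :
    (List.range k).foldl (fun acc _ => f acc) init = f^[k] init := by
  induction k generalizing init with
  | zero => simp
  | succ m ih =>
      rw [List.range_succ_eq_map]
      simp only [List.foldl_cons, List.foldl_map]
      rw [ih, ← Function.iterate_succ_apply]

theorem mer_iterate (arr1 : List String) :
    ∀ (k : Nat) (n : Int) (arr2 : List String), 1 ≤ n → n.toNat = k + 1 →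
      mer n arr1 arr2 = (merStep arr1)^[k] arr2 := by
  intro k
  induction k with
  | zero =>
      intro n arr2 h1 hk
      have : n = 1 := by omega
      subst this
      simp [mer]
  | succ m ih =>
      intro n arr2 h1 hk
      have hn : 1 < n := by omega
      rw [mer]
      have hne : (n == 1) = false := by simp; omega
      rw [hne]
      simp only [Bool.false_eq_true, if_false, dif_pos hn]
      rw [outer_foldl, List.nil_append]
      rw [ih (n - 1) _ (by omega) (by omega)]
      rw [← Function.iterate_succ_apply]

theorem mer_spec : Claim_equal_mer := by
  intro n arr1 arr2 _ hpre
  unfold Spec_mer mer_alt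
  rw [foldl_range_const]
  exact mer_iterate arr1 ((n - 1).toNat) n arr2 hpre (by unfold Pre_mer at hpre; omega)
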